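-- pv_equiv track=rewrite | github.com/luyandantombela223-ui/Software-Engineering-Portfolio | My Personal projects/calander_month.py | week
-- ===== SOURCE A (Python) =====
-- def week(week_number, start_day, days_in_month):
--     start_date = (week_number - 1) * 7 + 1 - (start_day - 1)
--     result = ""
--     for i in range(7):
--         day = start_date + i
--         if 1 <= day <= days_in_month:
--             result += f"{day:2d} "
--         else:
--             result += "   "
--     return result.rstrip()
-- ===== SOURCE B (Python) =====
-- def week(week_number, start_day, days_in_month):
--     start_date = (week_number - 1) * 7 + 1 - (start_day - 1)
--     first = max(start_date, 1)
--     last = min(start_date + 6, days_in_month)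
--     if last < first:
--         return ""
--     return "   " * (first - start_date) + " ".join(f"{d:2d}" for d in range(first, last + 1))
-- ===== Notes on version B (the rewrite author's own statement) =====
-- stated objective: alternative
-- what changed: B replaces A's 7-cell loop with a per-cell range test and final rstrip by a boundary computation: it clamps the week to [first,last], returns "" when empty, and otherwise emits leading blanks plus a single ' '.join over only the in-month days, never producing trailing blanks.
import Mathlib
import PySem

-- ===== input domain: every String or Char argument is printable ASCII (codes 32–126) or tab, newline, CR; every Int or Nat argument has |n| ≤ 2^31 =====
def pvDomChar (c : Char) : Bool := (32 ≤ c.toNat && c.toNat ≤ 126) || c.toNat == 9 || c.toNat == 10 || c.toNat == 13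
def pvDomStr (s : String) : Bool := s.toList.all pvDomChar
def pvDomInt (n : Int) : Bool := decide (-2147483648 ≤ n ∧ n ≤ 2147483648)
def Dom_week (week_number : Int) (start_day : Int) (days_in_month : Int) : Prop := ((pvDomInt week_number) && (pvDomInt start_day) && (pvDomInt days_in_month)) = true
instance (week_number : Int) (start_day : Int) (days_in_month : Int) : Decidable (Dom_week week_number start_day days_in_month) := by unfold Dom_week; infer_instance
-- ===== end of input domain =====

-- B builds the row from the clamped day interval (leading blanks + one join over in-month days)
-- instead of A's 7-cell loop with a per-cell range test and a final rstrip; objective: alternative decomposition.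

-- f"{n:2d}" : right-align str(n) in width 2, padding with a space (exact for the 2d format spec; used by both Pythons)
def fmt2 (n : Int) : List Char :=
  if (PySem.Int.toChars n).length < 2 then ' ' :: PySem.Int.toChars n else PySem.Int.toChars n

-- ===== PORT A =====
def week (week_number : Int) (start_day : Int) (days_in_month : Int) : String :=
  let start_date := (week_number - 1) * 7 + 1 - (start_day - 1)
  let result : List Char :=
    (PySem.List.pyRange 0 7 1).foldl (fun result i =>
      let day := start_date + i
      if 1 ≤ day ∧ day ≤ days_in_month then result ++ fmt2 day ++ [' ']
      else result ++ [' ', ' ', ' ']) []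
  String.ofList (PySem.Chars.rstrip result)

-- ===== PORT B =====
def week_alt (week_number : Int) (start_day : Int) (days_in_month : Int) : String :=
  let start_date := (week_number - 1) * 7 + 1 - (start_day - 1)
  let first := max start_date 1
  let last := min (start_date + 6) days_in_month
  if last < first then ""
  else
    String.ofList (PySem.List.pyRepeat [' ', ' ', ' '] (first - start_date) ++
      PySem.Chars.join [' '] ((PySem.List.pyRange first (last + 1) 1).map fmt2))

-- ===== PRECONDITION & SPEC =====
def Spec_week (week_number : Int) (start_day : Int) (days_in_month : Int) (out : String) : Prop := out = week_alt week_number start_day days_in_month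
instance (week_number : Int) (start_day : Int) (days_in_month : Int) (out : String) : Decidable (Spec_week week_number start_day days_in_month out) := by unfold Spec_week; infer_instance

-- ===== CLAIM (what is proved, stated in full; the proofs are below) =====
def Claim_equal_week : Prop := ∀ (week_number : Int) (start_day : Int) (days_in_month : Int), Dom_week week_number start_day days_in_month → Spec_week week_number start_day days_in_month (week week_number start_day days_in_month)

-- ===== LEMMAS AND PROOFS =====

-- one calendar cell of A's loop, as a standalone value
def cell (s dim i : Int) : List Char :=
  if 1 ≤ s + i ∧ s + i ≤ dim then fmt2 (s + i) ++ [' '] else [' ', ' ', ' ']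

lemma isspace_digitChar (d : Nat) (h : d < 10) : PySem.Chars.isspace (Nat.digitChar d) = false := by
  interval_cases d <;> decide

lemma toDigitsCore_nonspace : ∀ (fuel n : Nat) (ds : List Char),
    (∀ c ∈ ds, PySem.Chars.isspace c = false) →
    ∀ c ∈ Nat.toDigitsCore 10 fuel n ds, PySem.Chars.isspace c = false := by
  intro fuel
  induction fuel with
  | zero => intro n ds h; simpa [Nat.toDigitsCore] using h
  | succ fuel ih =>
    intro n ds h c hc
    rw [Nat.toDigitsCore] at hc
    have hlt : n % 10 < 10 := Nat.mod_lt _ (by norm_num)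
    by_cases h0 : n / 10 = 0
    · rw [if_pos h0] at hc
      rcases List.mem_cons.mp hc with rfl | hmem
      · exact isspace_digitChar _ hlt
      · exact h c hmem
    · rw [if_neg h0] at hc
      refine ih (n / 10) _ ?_ c hc
      intro c' hc'
      rcases List.mem_cons.mp hc' with rfl | hmem
      · exact isspace_digitChar _ hlt
      · exact h c' hmem

lemma toDigitsCore_ne_nil : ∀ (fuel n : Nat) (ds : List Char), ds ≠ [] → Nat.toDigitsCore 10 fuel n ds ≠ [] := by
  intro fuel
  induction fuel with
  | zero => intro n ds h; simpa [Nat.toDigitsCore] using h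
  | succ fuel ih =>
    intro n ds h
    rw [Nat.toDigitsCore]
    by_cases h0 : n / 10 = 0
    · rw [if_pos h0]; simp
    · rw [if_neg h0]; exact ih _ _ (by simp)

lemma toDigits_ne_nil (n : Nat) : Nat.toDigits 10 n ≠ [] := by
  rw [Nat.toDigits, Nat.toDigitsCore]
  by_cases h0 : n / 10 = 0
  · rw [if_pos h0]; simp
  · rw [if_neg h0]; exact toDigitsCore_ne_nil _ _ _ (by simp)

lemma exists_last_digit (d : Int) (h : 1 ≤ d) :
    ∃ ys c, PySem.Int.toChars d = ys ++ [c] ∧ PySem.Chars.isspace c = false := by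
  have h1 : PySem.Int.toChars d = Nat.toDigits 10 d.toNat := by
    unfold PySem.Int.toChars; rw [if_neg (by omega)]
  rcases List.eq_nil_or_concat (Nat.toDigits 10 d.toNat) with hnil | ⟨ys, c, hcat⟩
  · exact absurd hnil (toDigits_ne_nil _)
  · refine ⟨ys, c, by rw [h1, hcat, List.concat_eq_append], ?_⟩
    have hmem : c ∈ Nat.toDigits 10 d.toNat := by rw [hcat]; simp
    rw [Nat.toDigits] at hmem
    exact toDigitsCore_nonspace _ _ _ (by simp) c hmem

lemma fmt2_concat (d : Int) (h : 1 ≤ d) :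
    ∃ ys c, fmt2 d = ys ++ [c] ∧ PySem.Chars.isspace c = false := by
  obtain ⟨ys, c, hc, hns⟩ := exists_last_digit d h
  unfold fmt2
  rw [hc]
  split
  · exact ⟨' ' :: ys, c, by simp, hns⟩
  · exact ⟨ys, c, rfl, hns⟩

lemma rstrip_append_singleton_space (xs : List Char) :
    PySem.Chars.rstrip (xs ++ [' ']) = PySem.Chars.rstrip xs := by
  unfold PySem.Chars.rstrip
  have hsp : PySem.Chars.isspace ' ' = true := by decide
  simp [hsp]

lemma rstrip_append_replicate (xs : List Char) (k : Nat) :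
    PySem.Chars.rstrip (xs ++ List.replicate k ' ') = PySem.Chars.rstrip xs := by
  induction k with
  | zero => simp
  | succ k ih =>
    rw [List.replicate_succ', ← List.append_assoc, rstrip_append_singleton_space, ih]

lemma rstrip_append_nonspace (xs : List Char) (c : Char) (h : PySem.Chars.isspace c = false) :
    PySem.Chars.rstrip (xs ++ [c]) = xs ++ [c] := by
  unfold PySem.Chars.rstrip
  simp [h]

lemma rstrip_flatMap_valid (l : List Int) (xs : List Char) (hne : l ≠ [])
    (hpos : ∀ d ∈ l, 1 ≤ d) :
    PySem.Chars.rstrip (xs ++ List.flatMap (fun d => fmt2 d ++ [' ']) l) =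
      xs ++ PySem.Chars.join [' '] (l.map fmt2) := by
  induction l generalizing xs with
  | nil => exact absurd rfl hne
  | cons d rest ih =>
    cases rest with
    | nil =>
      simp only [List.flatMap_cons, List.flatMap_nil, List.append_nil, List.map_cons,
        List.map_nil, PySem.Chars.join_singleton]
      rw [show xs ++ (fmt2 d ++ [' ']) = (xs ++ fmt2 d) ++ [' '] by simp,
        rstrip_append_singleton_space]
      obtain ⟨ys, c, hc, hns⟩ := fmt2_concat d (hpos d (by simp))
      rw [hc, ← List.append_assoc, rstrip_append_nonspace _ _ hns]
    | cons e rest' =>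
      have h1 : xs ++ List.flatMap (fun d => fmt2 d ++ [' ']) (d :: e :: rest') =
          (xs ++ (fmt2 d ++ [' '])) ++ List.flatMap (fun d => fmt2 d ++ [' ']) (e :: rest') := by
        simp
      rw [h1, ih (xs ++ (fmt2 d ++ [' '])) (by simp) (fun x hx => hpos x (List.mem_cons_of_mem d hx))]
      simp only [List.map_cons, PySem.Chars.join_cons_cons]
      simp

lemma flatten_replicate_spaces (k : Nat) :
    (List.replicate k ([' ', ' ', ' '] : List Char)).flatten = List.replicate (3 * k) ' ' := by
  induction k with
  | zero => rfl
  | succ k ih =>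
    rw [List.replicate_succ, List.flatten_cons, ih,
      show 3 * (k + 1) = 3 + 3 * k by ring, List.replicate_add]
    rfl

lemma pyRepeat_spaces (n : Int) :
    PySem.List.pyRepeat ([' ', ' ', ' '] : List Char) n = List.replicate (3 * n.toNat) ' ' := by
  unfold PySem.List.pyRepeat
  exact flatten_replicate_spaces n.toNat

lemma flatMap_cell_invalid (s dim : Int) (lo hi : Int)
    (h : ∀ i, lo ≤ i → i < hi → ¬(1 ≤ s + i ∧ s + i ≤ dim)) :
    List.flatMap (cell s dim) (PySem.List.pyRange lo hi 1) =
      List.replicate (3 * (hi - lo).toNat) ' ' := by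
  generalize hn : (hi - lo).toNat = n
  induction n generalizing lo with
  | zero =>
    have h1 : PySem.List.pyRange lo hi 1 = [] := by
      apply List.eq_nil_iff_forall_not_mem.mpr
      intro x hx
      have := PySem.List.mem_pyRange_one.mp hx
      omega
    rw [h1]
    simp
  | succ n ih =>
    have hlt : lo < hi := by omega
    rw [PySem.List.pyRange_one_cons hlt, List.flatMap_cons]
    rw [show cell s dim lo = [' ', ' ', ' '] from by
      unfold cell; rw [if_neg (h lo (le_refl lo) hlt)]]
    rw [ih (lo + 1) (fun i h1 h2 => h i (by omega) h2) (by omega)]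
    rw [show 3 * (n + 1) = 3 + 3 * n by ring, List.replicate_add]
    rfl

lemma map_add_pyRange (s lo hi : Int) :
    (PySem.List.pyRange lo hi 1).map (fun i => s + i) = PySem.List.pyRange (s + lo) (s + hi) 1 := by
  generalize hn : (hi - lo).toNat = n
  induction n generalizing lo with
  | zero =>
    have h1 : PySem.List.pyRange lo hi 1 = [] := by
      apply List.eq_nil_iff_forall_not_mem.mpr
      intro x hx
      have := PySem.List.mem_pyRange_one.mp hx
      omega
    have h2 : PySem.List.pyRange (s + lo) (s + hi) 1 = [] := by
      apply List.eq_nil_iff_forall_not_mem.mpr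
      intro x hx
      have := PySem.List.mem_pyRange_one.mp hx
      omega
    rw [h1, h2]; rfl
  | succ n ih =>
    have hlt : lo < hi := by omega
    rw [PySem.List.pyRange_one_cons hlt, PySem.List.pyRange_one_cons (show s + lo < s + hi by omega),
      List.map_cons, ih (lo + 1) (by omega)]
    rw [show s + (lo + 1) = s + lo + 1 by ring]

lemma flatMap_cell_valid (s dim p q : Int)
    (h : ∀ i, p ≤ i → i < q → (1 ≤ s + i ∧ s + i ≤ dim)) :
    List.flatMap (cell s dim) (PySem.List.pyRange p q 1) =
      List.flatMap (fun d => fmt2 d ++ [' ']) (PySem.List.pyRange (s + p) (s + q) 1) := by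
  rw [← map_add_pyRange, List.flatMap_map]
  unfold List.flatMap
  congr 1
  apply List.map_congr_left
  intro i hi
  have hmem := PySem.List.mem_pyRange_one.mp hi
  show cell s dim i = fmt2 (s + i) ++ [' ']
  unfold cell
  rw [if_pos (h i hmem.1 hmem.2)]

-- ===== VERDICT (by name: the statement is the Claim_ definition above) =====
theorem week_spec : Claim_equal_week := by
  intro wn sd dim _
  unfold Spec_week week week_alt
  dsimp only
  set s := (wn - 1) * 7 + 1 - (sd - 1) with hs
  set first := max s 1 with hfirst
  set last := min (s + 6) dim with hlast
  have hstep : (fun (result : List Char) (i : Int) =>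
      if 1 ≤ s + i ∧ s + i ≤ dim then result ++ fmt2 (s + i) ++ [' ']
      else result ++ [' ', ' ', ' ']) = fun result i => result ++ cell s dim i := by
    funext result i
    unfold cell
    split <;> simp
  rw [hstep, PySem.List.foldl_append_eq_flatMap, List.nil_append]
  by_cases hlt : last < first
  · rw [if_pos hlt]
    rw [flatMap_cell_invalid s dim 0 7 (by intro i h1 h2; omega)]
    have h7 : (3 * ((7:Int) - 0).toNat) = 21 := by decide
    rw [h7]
    have h0 : PySem.Chars.rstrip (List.replicate 21 ' ') = PySem.Chars.rstrip [] := by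
      simpa using rstrip_append_replicate [] 21
    rw [h0]
    rfl
  · rw [if_neg hlt]
    have hle : first ≤ last := by omega
    set p := first - s with hp
    set q := last + 1 - s with hq
    have hbounds : 0 ≤ p ∧ p ≤ q ∧ q ≤ 7 := by omega
    rw [PySem.List.pyRange_one_append 0 p 7 (by omega) (by omega),
      PySem.List.pyRange_one_append p q 7 (by omega) (by omega),
      List.flatMap_append, List.flatMap_append,
      flatMap_cell_invalid s dim 0 p (by intro i h1 h2; omega),
      flatMap_cell_valid s dim p q (by intro i h1 h2; constructor <;> omega),
      flatMap_cell_invalid s dim q 7 (by intro i h1 h2; omega),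
      show s + p = first by omega, show s + q = last + 1 by omega]
    have hne : PySem.List.pyRange first (last + 1) 1 ≠ [] := by
      rw [PySem.List.pyRange_one_cons (show first < last + 1 by omega)]
      simp
    have hpos : ∀ d ∈ PySem.List.pyRange first (last + 1) 1, 1 ≤ d := by
      intro d hd
      have := PySem.List.mem_pyRange_one.mp hd
      omega
    rw [← List.append_assoc, rstrip_append_replicate, rstrip_flatMap_valid _ _ hne hpos,
      pyRepeat_spaces]
    norm_num
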